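-- pv_equiv track=rewrite | github.com/venkateswarlu02/DSA0321 | Q23 N.py | evaluate_coherence
-- ===== SOURCE A (Python) =====
-- def evaluate_coherence(text):
--     sentences = text.split('.')
--     coherence_score = 0
--
--     for i in range(1, len(sentences)):
--         words_current = sentences[i].strip().split()
--         words_previous = sentences[i-1].strip().split()
--
--         if words_current and words_previous and words_current[0] == words_previous[-1]:
--             coherence_score += 1
--
--     return coherence_score
-- ===== SOURCE B (Python) =====
-- def evaluate_coherence(text):
--     # Single streaming pass over the characters: no split() at all.
--     count = 0
--     prev_last = None   # last word of the previous sentence (None if it had no words)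
--     first = None       # first word of the current sentence
--     last = None        # last word of the current sentence
--     word = ''          # word currently being read
--     any_prev = False   # a previous sentence exists
--     for c in text + '.':
--         if c == '.' or c.isspace():
--             if word:
--                 if first is None:
--                     first = word
--                 last = word
--                 word = ''
--             if c == '.':
--                 if any_prev and first is not None and prev_last is not None and first == prev_last:
--                     count += 1
--                 prev_last = last
--                 first = None
--                 last = None
--                 any_prev = True
--         else:
--             word += c
--     return count
-- ===== Notes on version B (the rewrite author's own statement) =====
-- stated objective: alternative
-- what changed: B never calls split: it makes one streaming pass over the characters (with a terminating '.'), building words on the fly and tracking the current sentence's first/last word and the previous sentence's last word, counting a match at each sentence boundary; A splits the text into sentences and re-splits each interior sentence and its predecessor inside an index loop.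
import Mathlib
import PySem

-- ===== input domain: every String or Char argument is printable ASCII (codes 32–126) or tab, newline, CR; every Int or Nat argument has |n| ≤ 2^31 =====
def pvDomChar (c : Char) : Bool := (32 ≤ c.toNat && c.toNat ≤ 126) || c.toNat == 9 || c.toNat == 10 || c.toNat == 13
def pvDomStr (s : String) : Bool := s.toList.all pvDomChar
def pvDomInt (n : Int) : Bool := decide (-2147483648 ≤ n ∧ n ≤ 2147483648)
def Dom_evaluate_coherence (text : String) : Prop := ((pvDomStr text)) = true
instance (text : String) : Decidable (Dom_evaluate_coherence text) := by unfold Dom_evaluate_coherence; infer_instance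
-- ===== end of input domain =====

-- B replaces A's split-and-index loop by a single streaming scan over the characters
-- (no split at all: it tracks the current word and the sentence boundary words on the fly);
-- alternative decomposition, same asymptotic cost.


-- ===== PORT A =====
def evaluate_coherence (text : String) : Int :=
  let sentences := (PySem.Str.split? text ".").getD []
  (PySem.List.pyRange 1 sentences.length 1).foldl
    (fun score i =>
      let words_current := PySem.Str.split₀ (PySem.Str.strip (PySem.List.pyGetD sentences i ""))
      let words_previous := PySem.Str.split₀ (PySem.Str.strip (PySem.List.pyGetD sentences (i - 1) ""))
      if words_current ≠ [] ∧ words_previous ≠ [] ∧ words_current.head! = words_previous.getLast!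
      then score + 1 else score) 0

-- ===== PORT B =====
-- B's scanner state: count, last word of the previous sentence (none = no words),
-- first/last word of the current sentence, the word being read, and whether a
-- previous sentence exists.  Words are tracked as List Char (PySem's string carrier;
-- Python string equality = list equality, exact here).
structure PvSt where
  cnt : Int
  prevLast : Option (List Char)
  first : Option (List Char)
  last : Option (List Char)
  word : List Char
  anyPrev : Bool
  deriving Repr, DecidableEq

-- 'any_prev and first is not None and prev_last is not None and first == prev_last'
def pvMatch (f p : Option (List Char)) : Bool :=
  match f, p with
  | some f, some p => f == p
  | _, _ => false

def pvStep (st : PvSt) (c : Char) : PvSt :=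
  if c = '.' ∨ PySem.Chars.isspace c then
    let st1 := if st.word ≠ [] then
        { st with first := (match st.first with | none => some st.word | some f => some f),
                  last := some st.word, word := [] }
      else st
    if c = '.' then
      { cnt := if st1.anyPrev && pvMatch st1.first st1.prevLast then st1.cnt + 1 else st1.cnt,
        prevLast := st1.last, first := none, last := none, word := [], anyPrev := true }
    else st1
  else { st with word := st.word ++ [c] }

def evaluate_coherence_alt (text : String) : Int :=
  ((text.toList ++ ['.']).foldl pvStep ⟨0, none, none, none, [], false⟩).cnt

-- ===== PRECONDITION & SPEC =====
def Spec_evaluate_coherence (text : String) (out : Int) : Prop := out = evaluate_coherence_alt text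
instance (text : String) (out : Int) : Decidable (Spec_evaluate_coherence text out) := by unfold Spec_evaluate_coherence; infer_instance

-- ===== CLAIM (what is proved, stated in full; the proofs are below) =====
def Claim_equal_evaluate_coherence : Prop := ∀ (text : String), Dom_evaluate_coherence text → Spec_evaluate_coherence text (evaluate_coherence text)

-- ===== LEMMAS AND PROOFS =====

-- ---------- A's loop body, abstracted over the sentence list ----------
def pvF (l : List String) (score : Int) (i : Int) : Int :=
  let words_current := PySem.Str.split₀ (PySem.Str.strip (PySem.List.pyGetD l i ""))
  let words_previous := PySem.Str.split₀ (PySem.Str.strip (PySem.List.pyGetD l (i - 1) ""))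
  if words_current ≠ [] ∧ words_previous ≠ [] ∧ words_current.head! = words_previous.getLast!
  then score + 1 else score

def pvBound (sentence : String) : Option (String × String) :=
  let words := PySem.Str.split₀ (PySem.Str.strip sentence)
  match words with
  | [] => none
  | h :: t => some (h, (h :: t).getLast (by simp))

def pvG (count : Int) (pc : Option (String × String) × Option (String × String)) : Int :=
  match pc with
  | (some prev, some cur) => if cur.1 = prev.2 then count + 1 else count
  | _ => count

lemma pvF_eq_pvG (l : List String) (p c : String)
    (i : Int) (hi : PySem.List.pyGetD l i "" = c) (hi' : PySem.List.pyGetD l (i-1) "" = p)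
    (acc : Int) : pvF l acc i = pvG acc (pvBound p, pvBound c) := by
  simp only [pvF, hi, hi', pvG, pvBound]
  cases hcur : PySem.Str.split₀ (PySem.Str.strip c) with
  | nil => simp
  | cons h t =>
    cases hprev : PySem.Str.split₀ (PySem.Str.strip p) with
    | nil => simp
    | cons h' t' =>
      rw [List.getLast!_eq_getLast?_getD,
        List.getLast?_eq_some_getLast (l := h' :: t') (by simp)]
      simp

lemma pvShift (a : String) (l : List String) (d k : Nat) (hk : 1 ≤ k)
    (hd : d = l.length - k) (acc : Int) :
    (PySem.List.pyRange ((k : Int) + 1) ((l.length : Int) + 1) 1).foldl (pvF (a :: l)) acc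
      = (PySem.List.pyRange (k : Int) (l.length : Int) 1).foldl (pvF l) acc := by
  induction d generalizing k acc with
  | zero =>
    rw [PySem.List.pyRange_one_eq_nil (by omega), PySem.List.pyRange_one_eq_nil (by omega)]
    simp only [List.foldl_nil]
  | succ n ih =>
    have hlt : (k : Int) < l.length := by omega
    rw [PySem.List.pyRange_one_cons (by omega), PySem.List.pyRange_one_cons hlt]
    simp only [List.foldl_cons]
    have g1 : PySem.List.pyGetD (a :: l) ((k : Int) + 1) "" = l.getD k "" := by
      rw [show ((k : Int) + 1) = ((k + 1 : Nat) : Int) by push_cast; ring,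
        PySem.List.pyGetD_natCast]
      simp [List.getD]
    have g2 : PySem.List.pyGetD (a :: l) ((k : Int) + 1 - 1) "" = l.getD (k - 1) "" := by
      rw [show ((k : Int) + 1 - 1) = ((k : Nat) : Int) by ring, PySem.List.pyGetD_natCast]
      cases k with
      | zero => exact absurd hk (by omega)
      | succ m => simp [List.getD]
    have g3 : PySem.List.pyGetD l ((k : Int)) "" = l.getD k "" := PySem.List.pyGetD_natCast l k ""
    have g4 : PySem.List.pyGetD l ((k : Int) - 1) "" = l.getD (k - 1) "" := by
      rw [show ((k : Int) - 1) = ((k - 1 : Nat) : Int) by push_cast [hk]; ring,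
        PySem.List.pyGetD_natCast]
    have e1 : pvF (a :: l) acc ((k : Int) + 1) = pvF l acc (k : Int) := by
      simp only [pvF, g1, g2, g3, g4]
    rw [e1]
    have h4 : (k : Int) + 1 + 1 = ((k + 1 : Nat) : Int) + 1 := by push_cast; ring
    have h5 : (k : Int) + 1 = ((k + 1 : Nat) : Int) := by push_cast; ring
    rw [h4, h5, ih (k + 1) (by omega) (by omega)]

lemma pvA_eq_pairs (l : List String) (acc : Int) :
    (PySem.List.pyRange 1 (l.length : Int) 1).foldl (pvF l) acc
      = (l.zip l.tail).foldl (fun acc pc => pvG acc (pvBound pc.1, pvBound pc.2)) acc := by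
  induction l generalizing acc with
  | nil => rw [PySem.List.pyRange_one_eq_nil (by simp)]; rfl
  | cons a l ih =>
    cases l with
    | nil => rw [PySem.List.pyRange_one_eq_nil (by simp)]; rfl
    | cons b r =>
      rw [PySem.List.pyRange_one_cons (by push_cast [List.length_cons]; omega)]
      simp only [List.foldl_cons]
      have e1 : pvF (a :: b :: r) acc 1 = pvG acc (pvBound a, pvBound b) := by
        apply pvF_eq_pvG (a :: b :: r) a b
        · rw [show (1 : Int) = ((1 : Nat) : Int) by norm_num, PySem.List.pyGetD_natCast]
          simp [List.getD]
        · rw [show (1 : Int) - 1 = ((0 : Nat) : Int) by norm_num, PySem.List.pyGetD_natCast]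
          simp [List.getD]
      rw [e1]
      have hlen : ((a :: b :: r).length : Int) = (((b :: r).length : Nat) : Int) + 1 := by
        push_cast [List.length_cons]; ring
      rw [hlen, show (1 : Int) + 1 = ((1 : Nat) : Int) + 1 by norm_num,
        pvShift a (b :: r) ((b :: r).length - 1) 1 (by omega) rfl,
        show ((1 : Nat) : Int) = (1 : Int) by norm_num, ih]
      rfl

-- ---------- split₀ plumbing ----------
-- the accumulator of split₀.go only prepends
lemma pvGoAcc (s : List Char) : ∀ cur acc,
    PySem.Chars.split₀.go s cur acc = acc.reverse ++ PySem.Chars.split₀.go s cur [] := by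
  induction s with
  | nil => intro cur acc; simp [PySem.Chars.split₀.go]; split_ifs <;> simp
  | cons c r ih =>
    intro cur acc
    simp only [PySem.Chars.split₀.go]
    split_ifs with h1 h2
    · exact ih [] acc
    · rw [ih [] (cur.reverse :: acc), ih [] [cur.reverse]]; simp
    · exact ih (c :: cur) acc

-- scanning only whitespace finishes the pending word and nothing else
lemma pvGoSpace (t : List Char) (ht : ∀ c ∈ t, PySem.Chars.isspace c = true) :
    ∀ cur acc, PySem.Chars.split₀.go t cur acc = PySem.Chars.split₀.go [] cur acc := by
  induction t with
  | nil => intro cur acc; rfl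
  | cons c r ih =>
    intro cur acc
    have hc : PySem.Chars.isspace c = true := ht c (by simp)
    have hr : ∀ c ∈ r, PySem.Chars.isspace c = true := fun c hm => ht c (by simp [hm])
    simp only [PySem.Chars.split₀.go, hc, if_true]
    split_ifs with h
    · rw [ih hr]
      simp only [PySem.Chars.split₀.go]
      simp_all
    · rw [ih hr]
      simp only [PySem.Chars.split₀.go]
      simp_all

lemma pvGoAppendSpace (t : List Char) (ht : ∀ c ∈ t, PySem.Chars.isspace c = true) :
    ∀ (s cur : List Char) (acc : List (List Char)),
    PySem.Chars.split₀.go (s ++ t) cur acc = PySem.Chars.split₀.go s cur acc := by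
  intro s
  induction s with
  | nil => intro cur acc; exact pvGoSpace t ht cur acc
  | cons c r ih =>
    intro cur acc
    simp only [List.cons_append, PySem.Chars.split₀.go]
    split_ifs <;> simp [ih]

lemma pvGoLstrip (s : List Char) : ∀ acc,
    PySem.Chars.split₀.go (List.dropWhile PySem.Chars.isspace s) [] acc
      = PySem.Chars.split₀.go s [] acc := by
  induction s with
  | nil => intro acc; rfl
  | cons c r ih =>
    intro acc
    by_cases hc : PySem.Chars.isspace c = true
    · rw [List.dropWhile_cons_of_pos hc]
      rw [ih]
      simp only [PySem.Chars.split₀.go, hc, if_true]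
      simp
    · rw [List.dropWhile_cons_of_neg (by simp [hc])]

lemma pvSplit_rstrip (u : List Char) :
    PySem.Chars.split₀ (PySem.Chars.rstrip u) = PySem.Chars.split₀ u := by
  have hu : u = PySem.Chars.rstrip u ++ (List.takeWhile PySem.Chars.isspace u.reverse).reverse := by
    unfold PySem.Chars.rstrip
    conv_lhs => rw [← List.reverse_reverse u,
      ← List.takeWhile_append_dropWhile (p := PySem.Chars.isspace) (l := u.reverse)]
    rw [List.reverse_append]
  have hsp : ∀ c ∈ (List.takeWhile PySem.Chars.isspace u.reverse).reverse,
      PySem.Chars.isspace c = true :=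
    fun c hc => List.mem_takeWhile_imp (List.mem_reverse.1 hc)
  unfold PySem.Chars.split₀
  conv_rhs => rw [hu]
  rw [pvGoAppendSpace _ hsp]

lemma pvSplit_strip (s : List Char) :
    PySem.Chars.split₀ (PySem.Chars.strip s) = PySem.Chars.split₀ s := by
  unfold PySem.Chars.strip
  rw [pvSplit_rstrip]
  unfold PySem.Chars.split₀ PySem.Chars.lstrip
  exact pvGoLstrip s []

-- ---------- single-char-separator split as a structural recursion ----------
def pvConsHead (p : List Char) : List (List Char) → List (List Char)
  | [] => [p]
  | h :: t => (p ++ h) :: t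

def pvDotSplit : List Char → List (List Char)
  | [] => [[]]
  | c :: r => if c = '.' then [] :: pvDotSplit r else pvConsHead [c] (pvDotSplit r)

lemma pvDotSplit_ne_nil (l : List Char) : pvDotSplit l ≠ [] := by
  cases l with
  | nil => simp [pvDotSplit]
  | cons c r =>
    simp only [pvDotSplit]
    split_ifs
    · simp
    · cases h : pvDotSplit r <;> simp [pvConsHead]

lemma pvConsHead_nil (ts : List (List Char)) (h : ts ≠ []) : pvConsHead [] ts = ts := by
  cases ts with
  | nil => exact absurd rfl h
  | cons a t => simp [pvConsHead]

lemma pvSplitOnGo (l : List Char) : ∀ (fuel : Nat) (cur : List Char) (acc : List (List Char)),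
    l.length < fuel →
    PySem.Chars.splitOn.go ['.'] fuel l cur acc
      = acc.reverse ++ pvConsHead cur.reverse (pvDotSplit l) := by
  induction l with
  | nil =>
    intro fuel cur acc hf
    cases fuel with
    | zero => omega
    | succ n => simp [PySem.Chars.splitOn.go, pvDotSplit, pvConsHead]
  | cons c r ih =>
    intro fuel cur acc hf
    cases fuel with
    | zero => simp at hf
    | succ n =>
      by_cases hc : c = '.'
      · subst hc
        have hpre : List.isPrefixOf ['.'] ('.' :: r) = true := by simp [List.isPrefixOf]
        simp only [PySem.Chars.splitOn.go, hpre, if_true]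
        rw [show List.drop (List.length ['.']) ('.' :: r) = r by simp]
        rw [ih n [] (cur.reverse :: acc) (by simp at hf; omega)]
        rw [show ([] : List Char).reverse = [] from rfl, pvConsHead_nil _ (pvDotSplit_ne_nil r)]
        simp [pvDotSplit, pvConsHead]
      · have hpre : List.isPrefixOf ['.'] (c :: r) = false := by
          simp [List.isPrefixOf]; exact fun h => absurd h.symm hc
        simp only [PySem.Chars.splitOn.go, hpre]
        rw [ih n (c :: cur) acc (by simp at hf; omega)]
        simp only [pvDotSplit, hc, if_false]
        cases h : pvDotSplit r with
        | nil => exact absurd h (pvDotSplit_ne_nil r)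
        | cons a t => simp [pvConsHead]

lemma pvSplitOn_eq (l : List Char) : PySem.Chars.splitOn l ['.'] = pvDotSplit l := by
  unfold PySem.Chars.splitOn
  rw [pvSplitOnGo l (l.length + 1) [] [] (by omega)]
  simp [pvConsHead_nil _ (pvDotSplit_ne_nil l)]

lemma pvDotSplit_flatten (l : List Char) :
    l ++ ['.'] = (pvDotSplit l).foldr (fun s acc => s ++ '.' :: acc) [] := by
  induction l with
  | nil => simp [pvDotSplit]
  | cons c r ih =>
    by_cases hc : c = '.'
    · subst hc; simp [pvDotSplit, ih]
    · simp only [pvDotSplit, hc, if_false]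
      cases h : pvDotSplit r with
      | nil => exact absurd h (pvDotSplit_ne_nil r)
      | cons a t =>
        simp only [pvConsHead, List.foldr_cons]
        rw [List.cons_append, ih, h]
        simp

lemma pvDotSplit_dotless (l : List Char) :
    ∀ s ∈ pvDotSplit l, ∀ c ∈ s, c ≠ '.' := by
  induction l with
  | nil => simp [pvDotSplit]
  | cons c r ih =>
    intro s hs x hx
    by_cases hc : c = '.'
    · subst hc
      rw [show pvDotSplit ('.' :: r) = [] :: pvDotSplit r from by simp [pvDotSplit]] at hs
      rcases List.mem_cons.1 hs with h | h
      · subst h; simp at hx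
      · exact ih s h x hx
    · rw [show pvDotSplit (c :: r) = pvConsHead [c] (pvDotSplit r) from by simp [pvDotSplit, hc]] at hs
      cases h : pvDotSplit r with
      | nil => exact absurd h (pvDotSplit_ne_nil r)
      | cons a t =>
        rw [h] at hs
        simp only [pvConsHead, List.mem_cons] at hs
        rcases hs with h' | h'
        · subst h'
          rcases List.mem_append.1 hx with hx | hx
          · simp at hx; subst hx; exact hc
          · exact ih a (by rw [h]; exact List.mem_cons_self ..) x hx
        · exact ih s (by rw [h]; exact List.mem_cons_of_mem _ h') x hx

-- ---------- B's word scanner, closed form ----------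
def pvWs (f l : Option (List Char)) (w : List Char) : List Char → Option (List Char) × Option (List Char)
  | [] => if w = [] then (f, l) else (f.or (some w), some w)
  | c :: r =>
    if PySem.Chars.isspace c then
      if w = [] then pvWs f l [] r else pvWs (f.or (some w)) (some w) [] r
    else pvWs f l (w ++ [c]) r

lemma pvWs_go (s : List Char) : ∀ (f l : Option (List Char)) (w : List Char),
    pvWs f l w s
      = (f.or (PySem.Chars.split₀.go s w.reverse []).head?,
         (PySem.Chars.split₀.go s w.reverse []).getLast?.or l) := by
  induction s with
  | nil =>
    intro f l w
    by_cases hw : w = []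
    · subst hw; simp [pvWs, PySem.Chars.split₀.go]
    · simp [pvWs, PySem.Chars.split₀.go, hw, List.isEmpty_iff]
  | cons c r ih =>
    intro f l w
    by_cases hsp : PySem.Chars.isspace c = true
    · by_cases hw : w = []
      · subst hw
        simp only [pvWs, hsp, if_true]
        rw [ih f l []]
        simp only [PySem.Chars.split₀.go, hsp, if_true]
        simp
      · simp only [pvWs, hsp, if_true, if_neg hw]
        rw [ih (f.or (some w)) (some w) []]
        have hgo : PySem.Chars.split₀.go (c :: r) w.reverse []
            = [w] ++ PySem.Chars.split₀.go r [] [] := by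
          simp only [PySem.Chars.split₀.go, hsp, if_true,
            List.isEmpty_iff, List.reverse_eq_nil_iff, if_neg hw]
          rw [pvGoAcc r [] [w.reverse.reverse]]
          simp
        rw [hgo, Prod.mk.injEq]
        refine ⟨?_, ?_⟩
        · rw [List.head?_append_of_ne_nil _ (by simp)]
          simp
        · rw [List.getLast?_append]
          cases hgl : (PySem.Chars.split₀.go r [] []).getLast? <;> simp [hgl]
    · simp only [pvWs, hsp, Bool.false_eq_true, if_false]
      rw [ih f l (w ++ [c])]
      simp only [PySem.Chars.split₀.go, hsp, Bool.false_eq_true, if_false]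
      simp

lemma pvWs_spec (s : List Char) :
    pvWs none none [] s = ((PySem.Chars.split₀ s).head?, (PySem.Chars.split₀ s).getLast?) := by
  rw [pvWs_go]
  simp [PySem.Chars.split₀]

-- ---------- B's fold, sentence by sentence ----------
lemma pvFirstOr (f : Option (List Char)) (w : List Char) :
    (match f with | none => some w | some f => some f) = f.or (some w) := by
  cases f <;> rfl

lemma pvSentence (s : List Char) (hs : ∀ c ∈ s, c ≠ '.') : ∀ st : PvSt,
    (s ++ ['.']).foldl pvStep st =
      { cnt := if st.anyPrev && pvMatch (pvWs st.first st.last st.word s).1 st.prevLast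
               then st.cnt + 1 else st.cnt,
        prevLast := (pvWs st.first st.last st.word s).2,
        first := none, last := none, word := [], anyPrev := true } := by
  induction s with
  | nil =>
    intro st
    show pvStep st '.' = _
    by_cases hw : st.word = []
    · simp [pvStep, pvWs, hw]
    · simp [pvStep, pvWs, hw, pvFirstOr]
  | cons c r ih =>
    intro st
    have hc : c ≠ '.' := hs c (List.mem_cons_self ..)
    have hr : ∀ x ∈ r, x ≠ '.' := fun x hx => hs x (List.mem_cons_of_mem _ hx)
    rw [List.cons_append, List.foldl_cons]
    by_cases hsp : PySem.Chars.isspace c = true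
    · by_cases hw : st.word = []
      · have hstep : pvStep st c = st := by simp [pvStep, hc, hsp, hw]
        rw [hstep, ih hr st]
        simp [pvWs, hsp, hw]
      · have hstep : pvStep st c
            = { st with first := st.first.or (some st.word), last := some st.word, word := [] } := by
          simp [pvStep, hc, hsp, hw, pvFirstOr]
        rw [hstep, ih hr _]
        simp [pvWs, hsp, hw]
    · have hstep : pvStep st c = { st with word := st.word ++ [c] } := by
        simp [pvStep, hc, hsp]
      rw [hstep, ih hr _]
      simp [pvWs, hsp]

def pvBl (s : List Char) : Option (List Char) × Option (List Char) := pvWs none none [] s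

def pvScan : Int → Option (List Char) → Bool → List (Option (List Char) × Option (List Char)) → Int
  | cnt, _, _, [] => cnt
  | cnt, prev, ap, b :: r => pvScan (if ap && pvMatch b.1 prev then cnt + 1 else cnt) b.2 true r

lemma pvM (sl : List (List Char)) (h : ∀ s ∈ sl, ∀ c ∈ s, c ≠ '.') :
    ∀ (cnt : Int) (prev : Option (List Char)) (ap : Bool),
    ((sl.foldr (fun s acc => s ++ '.' :: acc) []).foldl pvStep ⟨cnt, prev, none, none, [], ap⟩).cnt
      = pvScan cnt prev ap (sl.map pvBl) := by
  induction sl with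
  | nil => intro cnt prev ap; rfl
  | cons s r ih =>
    intro cnt prev ap
    rw [List.foldr_cons,
      show s ++ '.' :: (r.foldr (fun s acc => s ++ '.' :: acc) [])
        = (s ++ ['.']) ++ r.foldr (fun s acc => s ++ '.' :: acc) [] by simp,
      List.foldl_append, pvSentence s (h s (List.mem_cons_self ..)) _]
    rw [ih (fun x hx => h x (List.mem_cons_of_mem _ hx))]
    simp [pvScan, pvBl]

def pvPairCount (cnt : Int) (bl : List (Option (List Char) × Option (List Char))) : Int :=
  (bl.zip bl.tail).foldl (fun cnt pc => if pvMatch pc.2.1 pc.1.2 then cnt + 1 else cnt) cnt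

lemma pvZ1 : ∀ (bl : List (Option (List Char) × Option (List Char)))
    (cnt : Int) (prev x : Option (List Char)),
    pvScan cnt prev true bl = pvPairCount cnt ((x, prev) :: bl) := by
  intro bl
  induction bl with
  | nil => intro cnt prev x; rfl
  | cons b r ih =>
    intro cnt prev x
    simp only [pvScan, Bool.true_and, pvPairCount, List.tail_cons, List.zip_cons_cons,
      List.foldl_cons]
    rw [ih _ b.2 b.1]
    simp [pvPairCount]

lemma pvZ0 (bl : List (Option (List Char) × Option (List Char)))
    (cnt : Int) (prev : Option (List Char)) :
    pvScan cnt prev false bl = pvPairCount cnt bl := by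
  cases bl with
  | nil => rfl
  | cons b r =>
    have h0 : pvScan cnt prev false (b :: r) = pvScan cnt b.2 true r := by
      simp [pvScan]
    rw [h0, pvZ1 r cnt b.2 b.1]

-- ---------- A's pair fold over strings equals the model over char lists ----------
lemma pvOfList_inj (a b : List Char) (h : String.ofList a = String.ofList b) : a = b := by
  have := congrArg String.toList h
  simpa using this

lemma pvStrSplit (s : List Char) :
    PySem.Str.split₀ (PySem.Str.strip (String.ofList s)) = (PySem.Chars.split₀ s).map String.ofList := by
  unfold PySem.Str.split₀ PySem.Str.strip
  rw [String.toList_ofList, String.toList_ofList, pvSplit_strip]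

lemma pvCond (p c : List Char) (acc : Int) :
    pvG acc (pvBound (String.ofList p), pvBound (String.ofList c))
      = if pvMatch (pvBl c).1 (pvBl p).2 then acc + 1 else acc := by
  simp only [pvG, pvBound, pvStrSplit, pvBl, pvWs_spec]
  cases hc : PySem.Chars.split₀ c with
  | nil => cases hp : PySem.Chars.split₀ p <;> simp [pvMatch]
  | cons ch ct =>
    cases hp : PySem.Chars.split₀ p with
    | nil => simp [pvMatch]
    | cons ph pt =>
      simp only [List.map_cons, List.head?_cons]
      have hgl : (List.map String.ofList (ph :: pt)).getLast (by simp)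
          = String.ofList ((ph :: pt).getLast (by simp)) := by
        have h1 : (List.map String.ofList (ph :: pt)).getLast?
            = Option.map String.ofList ((ph :: pt).getLast?) := List.getLast?_map
        rw [List.getLast?_eq_some_getLast (l := ph :: pt) (by simp),
          List.getLast?_eq_some_getLast (l := List.map String.ofList (ph :: pt)) (by simp)] at h1
        simpa using h1
      rw [List.getLast?_eq_some_getLast (l := ph :: pt) (by simp)]
      simp only [List.map_cons] at hgl
      rw [hgl]
      by_cases heq : ch = (ph :: pt).getLast (by simp)
      · simp [pvMatch, heq]
      · have : ¬ String.ofList ch = String.ofList ((ph :: pt).getLast (by simp)) :=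
          fun h => heq (pvOfList_inj _ _ h)
        simp [pvMatch, heq, this]

lemma pvPairs_model : ∀ (sl : List (List Char)) (acc : Int),
    ((sl.map String.ofList).zip (sl.map String.ofList).tail).foldl
      (fun acc pc => pvG acc (pvBound pc.1, pvBound pc.2)) acc
    = pvPairCount acc (sl.map pvBl) := by
  intro sl
  induction sl with
  | nil => intro acc; rfl
  | cons a l ih =>
    cases l with
    | nil => intro acc; rfl
    | cons b r =>
      intro acc
      simp only [List.map_cons, List.tail_cons, List.zip_cons_cons, List.foldl_cons]
      rw [pvCond a b acc]
      have hih := ih (if pvMatch (pvBl b).1 (pvBl a).2 then acc + 1 else acc)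
      simp only [List.map_cons, List.tail_cons] at hih
      rw [hih]
      show pvPairCount _ (pvBl b :: List.map pvBl r) = pvPairCount acc (pvBl a :: pvBl b :: List.map pvBl r)
      simp only [pvPairCount, List.tail_cons, List.zip_cons_cons, List.foldl_cons]

-- ===== VERDICT (by name: the statement is the Claim_ definition above) =====
theorem evaluate_coherence_spec : Claim_equal_evaluate_coherence := by
  intro text _
  unfold Spec_evaluate_coherence
  have hsplit : (PySem.Str.split? text ".").getD []
      = (pvDotSplit text.toList).map String.ofList := by
    unfold PySem.Str.split? PySem.Chars.split?
    rw [show (".".toList.isEmpty) = false from rfl]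
    simp [pvSplitOn_eq, show ".".toList = ['.'] from rfl]
  have hA : evaluate_coherence text = pvPairCount 0 ((pvDotSplit text.toList).map pvBl) := by
    show (PySem.List.pyRange 1 (((PySem.Str.split? text ".").getD []).length : Int) 1).foldl
      (pvF ((PySem.Str.split? text ".").getD [])) 0 = _
    rw [pvA_eq_pairs, hsplit, pvPairs_model]
  have hB : evaluate_coherence_alt text = pvPairCount 0 ((pvDotSplit text.toList).map pvBl) := by
    unfold evaluate_coherence_alt
    rw [pvDotSplit_flatten text.toList,
      pvM _ (pvDotSplit_dotless text.toList) 0 none false, pvZ0]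
  rw [hA, hB]
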